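-- pv_equiv track=rewrite | github.com/baaaad/TIger | vilbert/datasets/flickr30k_ee_inserter_dataset.py | edit2sent
-- ===== SOURCE A (Python) =====
-- def edit2sent(sent, edits, last=False):
--     """
--     Edit the sentence given the edit operations.
--     :param sent: sentence to edit, list of string
--     :param edits: a sequence of edits in ['KEEP','DEL','STOP']+INS_vocab_set
--     :return: the new sentence, as the edit sequence is deterministic based on the edits labels
--     """
--     new_sent = []
--     sent_pointer = 0 #counter the total of KEEP and DEL, then align with original sentence
--
--     if len(edits) == 0 or len(sent) ==0: # edit_list empty, return original sent
--         return sent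
--
--     for i, edit in enumerate(edits):
--         if len(sent) > sent_pointer: #there are tokens left for editing
--             if edit =="KEEP":
--                 new_sent.append(sent[sent_pointer])
--                 sent_pointer += 1
--             elif edit =="DELETE":
--                 sent_pointer += 1
--     if sent_pointer < len(sent):
--         for i in range(sent_pointer,len(sent)):
--             new_sent.append(sent[i])
--     return new_sent
-- ===== SOURCE B (Python) =====
-- def edit2sent(sent, edits, last=False):
--     if len(edits) == 0 or len(sent) == 0:
--         return sent
--     ops = [e for e in edits if e == "KEEP" or e == "DELETE"]
--     out = []
--     for j, tok in enumerate(sent):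
--         if j >= len(ops) or ops[j] == "KEEP":
--             out.append(tok)
--     return out
-- ===== Notes on version B (the rewrite author's own statement) =====
-- stated objective: alternative
-- what changed: B iterates over the sentence tokens indexed against a pre-filtered list of consuming ops (KEEP/DELETE), instead of A's loop over the edits with a mutable sentence pointer plus a second copy-the-rest loop.
import Mathlib
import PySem

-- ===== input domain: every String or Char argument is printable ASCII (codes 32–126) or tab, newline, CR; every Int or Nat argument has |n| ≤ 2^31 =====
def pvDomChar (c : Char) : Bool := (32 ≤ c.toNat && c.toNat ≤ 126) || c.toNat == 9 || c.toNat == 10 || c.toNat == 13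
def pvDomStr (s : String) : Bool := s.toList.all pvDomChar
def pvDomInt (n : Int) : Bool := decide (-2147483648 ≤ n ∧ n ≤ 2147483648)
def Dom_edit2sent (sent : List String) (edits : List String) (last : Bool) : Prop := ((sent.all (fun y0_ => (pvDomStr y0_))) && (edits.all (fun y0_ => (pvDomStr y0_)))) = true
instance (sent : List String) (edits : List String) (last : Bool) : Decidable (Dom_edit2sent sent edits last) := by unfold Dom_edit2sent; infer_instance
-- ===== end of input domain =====

-- B replaces A's edit-driven loop with a mutable sentence pointer by a token-driven loop
-- indexed against a pre-filtered list of consuming ops; same cost, different decomposition.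

-- ===== PORT A =====
-- loop state: (new_sent, sent_pointer); sent[sent_pointer] is in range by the enclosing
-- 'len(sent) > sent_pointer' guard, so List.getD is exact here
def edit2sent (sent : List String) (edits : List String) (last : Bool) : List String :=
  if edits.length == 0 || sent.length == 0 then sent
  else
    let st := edits.foldl (fun (st : List String × Nat) edit =>
      if sent.length > st.2 then
        if edit == "KEEP" then (st.1 ++ [sent.getD st.2 ""], st.2 + 1)
        else if edit == "DELETE" then (st.1, st.2 + 1)
        else st
      else st) ([], 0)
    if st.2 < sent.length then
      (PySem.List.pyRange (st.2 : Int) (sent.length : Int) 1).foldl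
        (fun acc i => acc ++ [PySem.List.pyGetD sent i ""]) st.1
    else st.1

-- ===== PORT B =====
def edit2sent_alt (sent : List String) (edits : List String) (last : Bool) : List String :=
  if edits.length == 0 || sent.length == 0 then sent
  else
    let ops := edits.filter (fun e => e == "KEEP" || e == "DELETE")
    (PySem.List.enumerate sent 0).foldl
      (fun out p =>
        if decide ((ops.length : Int) ≤ p.1) || (PySem.List.pyGetD ops p.1 "" == "KEEP")
        then out ++ [p.2] else out) []

-- ===== PRECONDITION & SPEC =====
def Spec_edit2sent (sent : List String) (edits : List String) (last : Bool) (out : List String) : Prop := out = edit2sent_alt sent edits last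
instance (sent : List String) (edits : List String) (last : Bool) (out : List String) : Decidable (Spec_edit2sent sent edits last out) := by unfold Spec_edit2sent; infer_instance

-- ===== CLAIM (what is proved, stated in full; the proofs are below) =====
def Claim_equal_edit2sent : Prop := ∀ (sent : List String) (edits : List String) (last : Bool), Dom_edit2sent sent edits last → Spec_edit2sent sent edits last (edit2sent sent edits last)

-- ===== LEMMAS AND PROOFS =====

-- common specification: walk the sentence and the consuming ops together
def goED : List String → List String → List String
  | [], _ => []
  | t :: ts, [] => t :: ts
  | t :: ts, o :: os => if o == "KEEP" then t :: goED ts os else goED ts os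

theorem goED_nil_ops (ts : List String) : goED ts [] = ts := by
  cases ts <;> rfl

theorem goED_nil (ops : List String) : goED [] ops = [] := by
  cases ops <;> rfl

-- A-side step function restricted to consuming ops
def fA' (sent : List String) : List String × Nat → String → List String × Nat :=
  fun st e =>
    if sent.length > st.2 then
      if e == "KEEP" then (st.1 ++ [sent.getD st.2 ""], st.2 + 1)
      else (st.1, st.2 + 1)
    else st

theorem A_filter (sent : List String) :
    ∀ (edits : List String) (st : List String × Nat),
    edits.foldl (fun (st : List String × Nat) edit =>
      if sent.length > st.2 then
        if edit == "KEEP" then (st.1 ++ [sent.getD st.2 ""], st.2 + 1)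
        else if edit == "DELETE" then (st.1, st.2 + 1)
        else st
      else st) st
    = (edits.filter (fun e => e == "KEEP" || e == "DELETE")).foldl (fA' sent) st := by
  intro edits
  induction edits with
  | nil => intro st; rfl
  | cons e es ih =>
    intro st
    rw [List.foldl_cons]
    by_cases hk : e = "KEEP"
    · subst hk
      have hfil : List.filter (fun e => e == "KEEP" || e == "DELETE") ("KEEP" :: es)
          = "KEEP" :: List.filter (fun e => e == "KEEP" || e == "DELETE") es := by simp
      rw [hfil, List.foldl_cons, ih]
      congr 1
    · by_cases hd : e = "DELETE"
      · subst hd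
        have hfil : List.filter (fun e => e == "KEEP" || e == "DELETE") ("DELETE" :: es)
            = "DELETE" :: List.filter (fun e => e == "KEEP" || e == "DELETE") es := by simp
        rw [hfil, List.foldl_cons, ih]
        congr 1
      · have hfil : List.filter (fun e => e == "KEEP" || e == "DELETE") (e :: es)
            = List.filter (fun e => e == "KEEP" || e == "DELETE") es := by simp [hk, hd]
        rw [hfil, ih]
        congr 1
        simp [hk, hd]

theorem fA'_stuck (sent : List String) (l : List String) (acc : List String) (p : Nat)
    (hp : ¬ p < sent.length) : l.foldl (fA' sent) (acc, p) = (acc, p) := by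
  induction l with
  | nil => rfl
  | cons e es ih => simp [List.foldl, fA', hp, ih]

theorem A_loop (sent : List String) :
    ∀ (ops : List String) (acc : List String) (p : Nat), p ≤ sent.length →
    (ops.foldl (fA' sent) (acc, p)).1 ++ sent.drop (ops.foldl (fA' sent) (acc, p)).2
      = acc ++ goED (sent.drop p) ops
    ∧ (ops.foldl (fA' sent) (acc, p)).2 ≤ sent.length := by
  intro ops
  induction ops with
  | nil =>
    intro acc p hp
    simp [List.foldl, goED_nil_ops, hp]
  | cons o os ih =>
    intro acc p hp
    by_cases h : p < sent.length
    · have hdrop : sent.drop p = sent[p] :: sent.drop (p + 1) :=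
        List.drop_eq_getElem_cons h
      have hget : sent.getD p "" = sent[p] := List.getD_eq_getElem _ _ h
      rw [List.foldl_cons]
      by_cases hk : o = "KEEP"
      · subst hk
        have hstep : fA' sent (acc, p) "KEEP" = (acc ++ [sent[p]], p + 1) := by
          simp [fA', h]
        rw [hstep]
        obtain ⟨ih1, ih2⟩ := ih (acc ++ [sent[p]]) (p + 1) (by omega)
        refine ⟨?_, ih2⟩
        rw [ih1, hdrop]
        simp [goED]
      · have hstep : fA' sent (acc, p) o = (acc, p + 1) := by
          simp [fA', h, hk]
        rw [hstep]
        obtain ⟨ih1, ih2⟩ := ih acc (p + 1) (by omega)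
        refine ⟨?_, ih2⟩
        rw [ih1, hdrop]
        simp [goED, hk]
    · -- the pointer has consumed the whole sentence: the state is frozen
      have hpe : p = sent.length := by omega
      rw [fA'_stuck sent (o :: os) acc p h]
      simp [hpe, goED_nil]

theorem foldl_snoc {α : Type} (l : List α) (init : List α) :
    l.foldl (fun acc x => acc ++ [x]) init = init ++ l := by
  induction l generalizing init with
  | nil => simp
  | cons x xs ih => simp [List.foldl, ih]

-- A's value on the non-guard branch is goED sent ops
theorem A_eq_goED (sent edits : List String) (hs : sent ≠ []) (he : edits ≠ []) (last : Bool) :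
    edit2sent sent edits last
      = goED sent (edits.filter (fun e => e == "KEEP" || e == "DELETE")) := by
  have hg : (edits.length == 0 || sent.length == 0) = false := by
    simp [List.length_eq_zero_iff, hs, he]
  unfold edit2sent
  rw [hg]
  simp only [Bool.false_eq_true, if_false]
  rw [A_filter]
  set ops := edits.filter (fun e => e == "KEEP" || e == "DELETE") with hops
  have hmain := A_loop sent ops [] 0 (by omega)
  set st := ops.foldl (fA' sent) ([], 0) with hst
  by_cases h : st.2 < sent.length
  · simp only [h, if_true]
    rw [PySem.List.foldl_pyRange_pyGetD' sent "" (fun acc x => acc ++ [x]) st.1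
      (by positivity : (0 : Int) ≤ (st.2 : Int))]
    rw [foldl_snoc]
    simpa using hmain.1
  · simp only [h, if_false]
    have := hmain.1
    rw [List.drop_eq_nil_of_le (by omega : sent.length ≤ st.2)] at this
    simpa using this

-- B-side step function with explicit index offset k
def fB (ops : List String) (k : Nat) : List String → Int × String → List String :=
  fun out p =>
    if decide ((ops.length + k : Int) ≤ p.1) || (PySem.List.pyGetD ops (p.1 - k) "" == "KEEP")
    then out ++ [p.2] else out

theorem pyGetD_cons_shift (o : String) (os : List String) (m : Int) (hm : 0 ≤ m) :
    PySem.List.pyGetD (o :: os) (m + 1) "" = PySem.List.pyGetD os m "" := by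
  have h2 : m + 1 = ((m.toNat + 1 : Nat) : Int) := by omega
  have h1 : m = (m.toNat : Int) := by omega
  rw [h2, h1, PySem.List.pyGetD_natCast, PySem.List.pyGetD_natCast]
  have hmax : max m 0 = m := by omega
  simp [List.getD, hmax]

theorem B_loop (sent : List String) :
    ∀ (ops : List String) (k : Nat) (acc : List String),
    (PySem.List.enumerate sent (k : Int)).foldl (fB ops k) acc = acc ++ goED sent ops := by
  induction sent with
  | nil => intro ops k acc; simp [PySem.List.enumerate_nil, goED_nil]
  | cons t ts ih =>
    intro ops k acc
    rw [PySem.List.enumerate_cons, List.foldl_cons]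
    cases ops with
    | nil =>
      -- head: 0 + k ≤ k holds, the token is kept
      have hhead : fB [] k acc ((k : Int), t) = acc ++ [t] := by
        unfold fB
        rw [if_pos]
        simp only [Bool.or_eq_true, decide_eq_true_eq]
        left; simp
      rw [hhead]
      rw [PySem.List.foldl_congr_mem (PySem.List.enumerate ts ((k : Int) + 1))
        (fB [] k) (fB [] (k + 1)) (acc ++ [t]) ?hcong]
      case hcong =>
        intro out p hp
        obtain ⟨m, hm, rfl⟩ := (PySem.List.mem_enumerate_iff _ _ _).1 hp
        have c1 : ((([] : List String).length : Int) + (k : Nat) ≤ (k : Int) + 1 + m) := by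
          simp only [List.length_nil, Nat.cast_zero, zero_add]
          omega
        have c2 : ((([] : List String).length : Int) + ((k + 1 : Nat) : Int) ≤ (k : Int) + 1 + m) := by
          simp only [List.length_nil, Nat.cast_zero, zero_add]
          push_cast
          omega
        unfold fB
        rw [if_pos, if_pos]
        · simp only [Bool.or_eq_true, decide_eq_true_eq]; exact Or.inl c2
        · simp only [Bool.or_eq_true, decide_eq_true_eq]; exact Or.inl c1
      have hk1 : ((k : Int) + 1) = (((k + 1 : Nat)) : Int) := by push_cast; ring
      rw [hk1, ih [] (k + 1) (acc ++ [t])]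
      simp [goED_nil_ops, goED]
    | cons o os =>
      -- head: len(ops) + k ≤ k is false and ops[0] = o
      have hhead : fB (o :: os) k acc ((k : Int), t)
          = if o == "KEEP" then acc ++ [t] else acc := by
        unfold fB
        have h1 : decide ((((o :: os).length : Int) + (k : Nat)) ≤ ((k : Int), t).1) = false := by
          simp only [decide_eq_false_iff_not, List.length_cons]
          push_cast
          omega
        have hz : (((k : Int), t).1 - (k : Nat)) = (0 : Int) := by simp
        rw [h1, hz, PySem.List.pyGetD_zero]
        simp [List.getD]
      rw [hhead]
      rw [PySem.List.foldl_congr_mem (PySem.List.enumerate ts ((k : Int) + 1))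
        (fB (o :: os) k) (fB os (k + 1)) _ ?hcong2]
      case hcong2 =>
        intro out p hp
        obtain ⟨m, hm, rfl⟩ := (PySem.List.mem_enumerate_iff _ _ _).1 hp
        unfold fB
        dsimp only
        have e1 : ((k : Int) + 1 + (m : Int) - (k : Nat)) = ((m : Int)) + 1 := by
          ring
        have e2 : ((k : Int) + 1 + (m : Int) - ((k + 1 : Nat) : Int)) = ((m : Int)) := by
          push_cast; ring
        rw [e1, e2, pyGetD_cons_shift o os (m : Int) (by positivity)]
        congr 2
        congr 1
        rw [decide_eq_decide]
        simp only [List.length_cons]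
        push_cast
        omega
      have hk1 : ((k : Int) + 1) = (((k + 1 : Nat)) : Int) := by push_cast; ring
      rw [hk1, ih os (k + 1)]
      by_cases hko : o = "KEEP"
      · subst hko; simp [goED]
      · simp [goED, hko]

theorem B_eq_goED (sent edits : List String) (hs : sent ≠ []) (he : edits ≠ []) (last : Bool) :
    edit2sent_alt sent edits last
      = goED sent (edits.filter (fun e => e == "KEEP" || e == "DELETE")) := by
  have hg : (edits.length == 0 || sent.length == 0) = false := by
    simp [List.length_eq_zero_iff, hs, he]
  unfold edit2sent_alt
  rw [hg]
  simp only [Bool.false_eq_true, if_false]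
  set ops := edits.filter (fun e => e == "KEEP" || e == "DELETE") with hops
  have hfn : (fun (out : List String) (p : Int × String) =>
        if decide ((ops.length : Int) ≤ p.1) || (PySem.List.pyGetD ops p.1 "" == "KEEP")
        then out ++ [p.2] else out) = fB ops 0 := by
    funext out p
    simp [fB]
  have h0 : (0 : Int) = ((0 : Nat) : Int) := rfl
  rw [hfn, h0, B_loop sent ops 0 []]
  simp

-- ===== VERDICT (by name: the statement is the Claim_ definition above) =====
theorem edit2sent_spec : Claim_equal_edit2sent := by
  intro sent edits last _
  unfold Spec_edit2sent
  by_cases hs : sent = []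
  · subst hs; cases edits <;> rfl
  · by_cases he : edits = []
    · subst he
      unfold edit2sent edit2sent_alt
      simp
    · rw [A_eq_goED sent edits hs he last, B_eq_goED sent edits hs he last]
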